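-- pv_equiv track=rewrite | github.com/MikePolynin/python_basic | Module20/03_function/main.py | function
-- ===== SOURCE A (Python) =====
-- def function(user_tuple, user_symbol):
--     result_tuple = tuple()
--
--     if user_symbol in user_tuple:
--         count = 0
--
--         for symbol in user_tuple:
--             if symbol == user_symbol:
--                 count += 1
--             if count == 2:
--                 break
--
--         first_index = user_tuple.index(user_symbol)
--
--         if count == 1:
--             last_index = len(user_tuple) - 1
--         else:
--             last_index = user_tuple.index(user_symbol, first_index + 1, len(user_tuple))
--
--         result_tuple = user_tuple[first_index: last_index + 1]
--
--     return result_tuple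
-- ===== SOURCE B (Python) =====
-- def function(user_tuple, user_symbol):
--     # single forward pass, two-state machine: skip until the first occurrence,
--     # then emit elements until the second occurrence (inclusive) or the end
--     out = []
--     collecting = False
--     for s in user_tuple:
--         if collecting:
--             out.append(s)
--             if s == user_symbol:
--                 break
--         elif s == user_symbol:
--             out.append(s)
--             collecting = True
--     return tuple(out)
-- ===== Notes on version B (the rewrite author's own statement) =====
-- stated objective: alternative
-- what changed: B is a single forward pass with a two-state machine that emits elements directly between the first and second occurrence (or end), eliminating A's membership test, counting loop, two .index scans and the slice entirely.
import Mathlib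
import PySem

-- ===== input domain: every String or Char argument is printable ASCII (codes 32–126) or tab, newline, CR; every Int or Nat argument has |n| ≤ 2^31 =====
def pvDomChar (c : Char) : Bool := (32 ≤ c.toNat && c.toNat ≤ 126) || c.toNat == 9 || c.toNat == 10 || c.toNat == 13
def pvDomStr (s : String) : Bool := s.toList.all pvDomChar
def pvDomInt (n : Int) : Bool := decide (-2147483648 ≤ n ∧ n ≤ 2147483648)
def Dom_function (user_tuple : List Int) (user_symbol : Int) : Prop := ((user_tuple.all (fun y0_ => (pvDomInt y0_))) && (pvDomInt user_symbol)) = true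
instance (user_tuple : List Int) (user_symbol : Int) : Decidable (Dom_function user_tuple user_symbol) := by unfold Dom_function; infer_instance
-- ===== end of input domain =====

-- B replaces A's membership test + counting loop + two .index scans + slice by a
-- single forward pass with a two-state skip/collect machine that emits the output
-- directly (objective: alternative).

-- ===== PORT A =====
-- the 'for symbol in user_tuple' counting loop with its 'if count == 2: break'
def pvCountLoop (xs : List Int) (s : Int) (count : Int) : Int :=
  match xs with
  | [] => count
  | x :: rest =>
    let count' := if x = s then count + 1 else count
    if count' = 2 then count' else pvCountLoop rest s count'

def function (user_tuple : List Int) (user_symbol : Int) : List Int :=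
  if user_symbol ∈ user_tuple then
    let count := pvCountLoop user_tuple user_symbol 0
    match PySem.List.index? user_tuple user_symbol with
    | none => []   -- unreachable: user_symbol ∈ user_tuple
    | some first_index =>
      if count = 1 then
        -- last_index = len - 1
        PySem.List.slice user_tuple (some (first_index : Int))
          (some (((user_tuple.length : Int) - 1) + 1))
      else
        -- user_tuple.index(user_symbol, first_index + 1, len(user_tuple)):
        -- exact as search in the suffix after first_index, offset back
        match PySem.List.index? (user_tuple.drop (first_index + 1)) user_symbol with
        | none => []   -- unreachable: count = 2 guarantees a second occurrence
        | some m =>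
          PySem.List.slice user_tuple (some (first_index : Int))
            (some (((first_index : Int) + 1 + (m : Int)) + 1))
  else []

-- ===== PORT B =====
-- the loop's 'collecting = True' state: emit until the symbol reappears (inclusive)
def pvCollect (xs : List Int) (s : Int) : List Int :=
  match xs with
  | [] => []
  | x :: rest => if x = s then [x] else x :: pvCollect rest s

-- the loop's 'collecting = False' state: skip until the symbol first appears
def pvSkip (xs : List Int) (s : Int) : List Int :=
  match xs with
  | [] => []
  | x :: rest => if x = s then x :: pvCollect rest s else pvSkip rest s

def function_alt (user_tuple : List Int) (user_symbol : Int) : List Int :=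
  pvSkip user_tuple user_symbol

-- ===== PRECONDITION & SPEC =====
def Spec_function (user_tuple : List Int) (user_symbol : Int) (out : List Int) : Prop := out = function_alt user_tuple user_symbol
instance (user_tuple : List Int) (user_symbol : Int) (out : List Int) : Decidable (Spec_function user_tuple user_symbol out) := by unfold Spec_function; infer_instance

-- ===== CLAIM (what is proved, stated in full; the proofs are below) =====
def Claim_equal_function : Prop := ∀ (user_tuple : List Int) (user_symbol : Int), Dom_function user_tuple user_symbol → Spec_function user_tuple user_symbol (function user_tuple user_symbol)

-- ===== LEMMAS AND PROOFS =====

theorem pvSkip_append (pre rest : List Int) (s : Int) (h : s ∉ pre) :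
    pvSkip (pre ++ rest) s = pvSkip rest s := by
  induction pre with
  | nil => rfl
  | cons x xs ih =>
    have hx : x ≠ s := fun hxs => h (hxs ▸ List.mem_cons_self)
    simp [pvSkip, hx]
    exact ih (fun hm => h (List.mem_cons_of_mem _ hm))

theorem pvSkip_eq_nil_of_not_mem (xs : List Int) (s : Int) (h : s ∉ xs) :
    pvSkip xs s = [] := by
  have := pvSkip_append xs [] s h
  simpa using this

theorem pvCollect_of_not_mem (xs : List Int) (s : Int) (h : s ∉ xs) :
    pvCollect xs s = xs := by
  induction xs with
  | nil => rfl
  | cons x r ih =>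
    have hx : x ≠ s := fun hxs => h (hxs ▸ List.mem_cons_self)
    simp [pvCollect, hx]
    exact ih (fun hm => h (List.mem_cons_of_mem _ hm))

theorem pvCollect_append (pre suf : List Int) (s : Int) (h : s ∉ pre) :
    pvCollect (pre ++ s :: suf) s = pre ++ [s] := by
  induction pre with
  | nil => simp [pvCollect]
  | cons x xs ih =>
    have hx : x ≠ s := fun hxs => h (hxs ▸ List.mem_cons_self)
    simp [pvCollect, hx]
    exact ih (fun hm => h (List.mem_cons_of_mem _ hm))

-- the counting loop started at 1 (i.e. after the first occurrence)
theorem pvCountLoop_one (xs : List Int) (s : Int) :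
    pvCountLoop xs s 1 = if s ∈ xs then 2 else 1 := by
  induction xs with
  | nil => simp [pvCountLoop]
  | cons x xs ih =>
    by_cases hx : x = s
    · simp [pvCountLoop, hx]
    · have hsx : ¬s = x := fun e => hx e.symm
      simp [pvCountLoop, hx, ih, List.mem_cons, hsx]

-- the counting loop skips a prefix without occurrences (count stays 0)
theorem pvCountLoop_skip (pre rest : List Int) (s : Int) (h : s ∉ pre) :
    pvCountLoop (pre ++ rest) s 0 = pvCountLoop rest s 0 := by
  induction pre with
  | nil => rfl
  | cons x xs ih =>
    have hx : x ≠ s := fun hxs => h (hxs ▸ List.mem_cons_self)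
    simp [pvCountLoop, hx]
    exact ih (fun hm => h (List.mem_cons_of_mem _ hm))

theorem function_eq_alt (ut : List Int) (s : Int) :
    function ut s = function_alt ut s := by
  rcases h : PySem.List.index? ut s with _ | k
  · -- s ∉ ut
    have hnm : s ∉ ut := (PySem.List.index?_eq_none_iff _ _).mp h
    simp [function, function_alt, hnm, pvSkip_eq_nil_of_not_mem ut s hnm]
  · obtain ⟨pre, suf, hsplit, hlen, hpre⟩ := (PySem.List.index?_eq_some_iff _ _ _).mp h
    subst hsplit
    have hmem : s ∈ pre ++ s :: suf := by simp
    have hskip : pvSkip (pre ++ s :: suf) s = s :: pvCollect suf s := by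
      rw [pvSkip_append pre _ s hpre]; simp [pvSkip]
    have hdrop : (pre ++ s :: suf).drop (k + 1) = suf := by
      have : pre ++ s :: suf = (pre ++ [s]) ++ suf := by simp
      rw [this, ← hlen, show pre.length + 1 = (pre ++ [s]).length by simp,
        List.drop_left]
    have hcount : pvCountLoop (pre ++ s :: suf) s 0 = if s ∈ suf then 2 else 1 := by
      rw [pvCountLoop_skip pre (s :: suf) s hpre]
      simp only [pvCountLoop]
      norm_num
      exact pvCountLoop_one suf s
    rcases h2 : PySem.List.index? suf s with _ | m
    · -- single occurrence: A slices to the end, B collects the whole suffix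
      have hns : s ∉ suf := (PySem.List.index?_eq_none_iff _ _).mp h2
      simp only [function, function_alt, if_pos hmem, h, hcount, if_neg hns]
      rw [hskip, pvCollect_of_not_mem suf s hns]
      rw [if_pos trivial]
      have : ((pre ++ s :: suf).length : Int) - 1 + 1 = ((pre ++ s :: suf).length : Int) := by ring
      rw [this, PySem.List.slice_natCast]
      have hdk : (pre ++ s :: suf).drop k = s :: suf := by
        rw [← hlen, List.drop_left' rfl]
      rw [hdk]
      have : (pre ++ s :: suf).length - k = suf.length + 1 := by
        simp [← hlen]
      rw [this]
      exact List.take_of_length_le (by simp)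
    · -- second occurrence at position m of suf
      obtain ⟨pre2, suf2, hsplit2, hlen2, hpre2⟩ := (PySem.List.index?_eq_some_iff _ _ _).mp h2
      subst hsplit2
      have hms : s ∈ pre2 ++ s :: suf2 := by simp
      simp only [function, function_alt, if_pos hmem, h, hcount, if_pos hms, hdrop, h2]
      rw [if_neg (by norm_num : ¬(2:Int) = 1)]
      rw [hskip, pvCollect_append pre2 suf2 s hpre2]
      have : ((k : Int) + 1 + (m : Int)) + 1 = ((k + 1 + m + 1 : Nat) : Int) := by push_cast; ring
      rw [this, PySem.List.slice_natCast]
      have hdk : (pre ++ s :: (pre2 ++ s :: suf2)).drop k = s :: (pre2 ++ s :: suf2) := by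
        rw [← hlen, List.drop_left' rfl]
      rw [hdk]
      have htn : k + 1 + m + 1 - k = m + 2 := by omega
      rw [htn, ← hlen2]
      simp [List.take_append]

-- ===== VERDICT (by name: the statement is the Claim_ definition above) =====
theorem function_spec : Claim_equal_function := by
  intro ut s _
  exact function_eq_alt ut s
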